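-- pv_equiv track=rewrite | github.com/BhuwanSoni/elderassist | backend/agent.py | format_priority_memory
-- ===== SOURCE A (Python) =====
-- _MEMORY_PRIORITY = {
--     "son_name":         3,
--     "med_reminder":     2,
--     "emergency_action": 2,
--     "reminder":         2,
-- }
--
-- def format_priority_memory(memory: dict) -> str:
--     if not memory:
--         return "none"
--     sorted_items = sorted(
--         ((k, v) for k, v in memory.items() if v),
--         key=lambda x: _MEMORY_PRIORITY.get(x[0], 1),
--         reverse=True,
--     )
--     return ", ".join(f"{k}: {v}" for k, v in sorted_items) or "none"
-- ===== SOURCE B (Python) =====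
-- _MEMORY_PRIORITY = {
--     "son_name":         3,
--     "med_reminder":     2,
--     "emergency_action": 2,
--     "reminder":         2,
-- }
--
-- def format_priority_memory(memory: dict) -> str:
--     if not memory:
--         return "none"
--     b3, b2, b1 = [], [], []
--     for k, v in memory.items():
--         if v:
--             part = f"{k}: {v}"
--             pr = _MEMORY_PRIORITY.get(k, 1)
--             if pr == 3:
--                 b3.append(part)
--             elif pr == 2:
--                 b2.append(part)
--             else:
--                 b1.append(part)
--     return ", ".join(b3 + b2 + b1) or "none"
-- ===== Notes on version B (the rewrite author's own statement) =====
-- stated objective: alternative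
-- what changed: Replaces the key-based stable reverse sort with a single pass that distributes formatted entries into three priority buckets (priorities can only be 3, 2 or 1) and concatenates the buckets in descending order.
import Mathlib
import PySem

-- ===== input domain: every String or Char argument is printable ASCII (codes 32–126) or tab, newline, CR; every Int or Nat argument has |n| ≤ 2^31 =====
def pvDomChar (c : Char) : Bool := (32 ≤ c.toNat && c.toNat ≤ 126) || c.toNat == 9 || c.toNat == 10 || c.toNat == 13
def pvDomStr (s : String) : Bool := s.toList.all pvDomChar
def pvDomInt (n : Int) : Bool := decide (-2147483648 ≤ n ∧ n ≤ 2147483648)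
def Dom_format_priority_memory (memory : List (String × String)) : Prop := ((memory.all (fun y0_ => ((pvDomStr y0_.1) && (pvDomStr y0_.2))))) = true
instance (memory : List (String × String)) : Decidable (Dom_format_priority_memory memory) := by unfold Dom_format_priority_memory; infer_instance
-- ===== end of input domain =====

-- B replaces the stable reverse sort by priority key with a single bucketing pass
-- (three accumulators, one per possible priority) concatenated in descending order:
-- objective 'alternative'.

-- module constant _MEMORY_PRIORITY, shared by both programs
def pvPriorityDict : PySem.Dict String Int :=
  PySem.Dict.mk [("son_name", 3), ("med_reminder", 2), ("emergency_action", 2), ("reminder", 2)]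

-- _MEMORY_PRIORITY.get(k, 1)
def pvPrio (k : String) : Int := PySem.Dict.getD pvPriorityDict k 1

-- ===== PORT A =====
def format_priority_memory (memory : List (String × String)) : String :=
  if memory = [] then "none"
  else
    let sorted_items :=
      PySem.List.sorted (memory.filter (fun kv => kv.2 ≠ "")) (fun x => pvPrio x.1) true
    let s := PySem.Str.join ", " (sorted_items.map (fun kv => kv.1 ++ ": " ++ kv.2))
    if s = "" then "none" else s

-- ===== PORT B =====
-- one pass: distribute each formatted non-empty entry into its priority bucket
def pvBucketStep (acc : List String × List String × List String) (kv : String × String) :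
    List String × List String × List String :=
  if kv.2 = "" then acc
  else
    let part := kv.1 ++ ": " ++ kv.2
    let pr := pvPrio kv.1
    if pr = 3 then (acc.1 ++ [part], acc.2.1, acc.2.2)
    else if pr = 2 then (acc.1, acc.2.1 ++ [part], acc.2.2)
    else (acc.1, acc.2.1, acc.2.2 ++ [part])

def format_priority_memory_alt (memory : List (String × String)) : String :=
  if memory = [] then "none"
  else
    let b := memory.foldl pvBucketStep ([], [], [])
    let s := PySem.Str.join ", " (b.1 ++ b.2.1 ++ b.2.2)
    if s = "" then "none" else s

-- ===== PRECONDITION & SPEC =====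
def Spec_format_priority_memory (memory : List (String × String)) (out : String) : Prop := out = format_priority_memory_alt memory
instance (memory : List (String × String)) (out : String) : Decidable (Spec_format_priority_memory memory out) := by unfold Spec_format_priority_memory; infer_instance

-- ===== CLAIM (what is proved, stated in full; the proofs are below) =====
def Claim_equal_format_priority_memory : Prop := ∀ (memory : List (String × String)), Dom_format_priority_memory memory → Spec_format_priority_memory memory (format_priority_memory memory)

-- ===== LEMMAS AND PROOFS =====

-- every priority is 3, 2 or 1
lemma pvPrio_cases (k : String) : pvPrio k = 3 ∨ pvPrio k = 2 ∨ pvPrio k = 1 := by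
  by_cases h1 : k = "son_name"
  · subst h1; left; decide
  by_cases h2 : k = "med_reminder"
  · subst h2; right; left; decide
  by_cases h3 : k = "emergency_action"
  · subst h3; right; left; decide
  by_cases h4 : k = "reminder"
  · subst h4; right; left; decide
  right; right
  simp [pvPrio, pvPriorityDict, PySem.Dict.getD, PySem.Dict.get?,
    beq_iff_eq, Ne.symm h1, Ne.symm h2, Ne.symm h3, Ne.symm h4]

lemma insertBy_append_not_before {α : Type} (before : α → α → Bool) (x : α) (A B : List α)
    (h : ∀ y ∈ A, before x y = false) :
    PySem.List.insertBy before x (A ++ B) = A ++ PySem.List.insertBy before x B := by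
  induction A with
  | nil => rfl
  | cons a t ih =>
    have ha := h a (by simp)
    simp [PySem.List.insertBy, ha, ih (fun y hy => h y (by simp [hy]))]

lemma insertBy_all_before {α : Type} (before : α → α → Bool) (x : α) (ys : List α)
    (h : ∀ y ∈ ys, before x y = true) :
    PySem.List.insertBy before x ys = x :: ys := by
  cases ys with
  | nil => rfl
  | cons y t => simp [PySem.List.insertBy, h y (by simp)]

-- the stable reverse sort by priority is exactly the three buckets in descending order
lemma sorted_rev_eq_buckets (xs : List (String × String)) :
    PySem.List.sorted xs (fun x => pvPrio x.1) true =
      xs.filter (fun kv => pvPrio kv.1 = 3) ++ xs.filter (fun kv => pvPrio kv.1 = 2)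
        ++ xs.filter (fun kv => pvPrio kv.1 = 1) := by
  rw [PySem.List.sorted_rev_eq_foldl_insertBy]
  induction xs using List.reverseRecOn with
  | nil => rfl
  | append_singleton xs x ih =>
    rw [List.foldl_append, List.foldl_cons, List.foldl_nil, ih]
    have mem3 : ∀ y ∈ xs.filter (fun kv => pvPrio kv.1 = 3), pvPrio y.1 = 3 := by
      intro y hy; simpa using (List.mem_filter.mp hy).2
    have mem2 : ∀ y ∈ xs.filter (fun kv => pvPrio kv.1 = 2), pvPrio y.1 = 2 := by
      intro y hy; simpa using (List.mem_filter.mp hy).2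
    have mem1 : ∀ y ∈ xs.filter (fun kv => pvPrio kv.1 = 1), pvPrio y.1 = 1 := by
      intro y hy; simpa using (List.mem_filter.mp hy).2
    have e3t : (xs ++ [x]).filter (fun kv => pvPrio kv.1 = 3) =
        xs.filter (fun kv => pvPrio kv.1 = 3) ++ [x].filter (fun kv => pvPrio kv.1 = 3) :=
      List.filter_append _ _
    have e2t : (xs ++ [x]).filter (fun kv => pvPrio kv.1 = 2) =
        xs.filter (fun kv => pvPrio kv.1 = 2) ++ [x].filter (fun kv => pvPrio kv.1 = 2) :=
      List.filter_append _ _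
    have e1t : (xs ++ [x]).filter (fun kv => pvPrio kv.1 = 1) =
        xs.filter (fun kv => pvPrio kv.1 = 1) ++ [x].filter (fun kv => pvPrio kv.1 = 1) :=
      List.filter_append _ _
    rw [e3t, e2t, e1t]
    rcases pvPrio_cases x.1 with h | h | h
    · rw [List.append_assoc, insertBy_append_not_before _ x _ _
        (by intro y hy; simp [mem3 y hy, h])]
      rw [insertBy_all_before _ x _
        (by intro y hy; rcases List.mem_append.mp hy with hy | hy
            · simp [mem2 y hy, h]
            · simp [mem1 y hy, h])]
      simp [h]
    · rw [insertBy_append_not_before _ x _ _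
        (by intro y hy; rcases List.mem_append.mp hy with hy | hy
            · simp [mem3 y hy, h]
            · simp [mem2 y hy, h])]
      rw [insertBy_all_before _ x _ (by intro y hy; simp [mem1 y hy, h])]
      simp [h]
    · rw [PySem.List.insertBy_of_forall_not_before _ x _
        (by intro y hy; rcases List.mem_append.mp hy with hy | hy
            · rcases List.mem_append.mp hy with hy | hy
              · simp [mem3 y hy, h]
              · simp [mem2 y hy, h]
            · simp [mem1 y hy, h])]
      simp [h]

-- B's one-pass fold computes exactly the three bucketed, formatted lists
def pvPart (kv : String × String) : String := kv.1 ++ ": " ++ kv.2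

def pvBucketOf (p : Int) (xs : List (String × String)) : List String :=
  (xs.filter (fun kv => kv.2 ≠ "" ∧ pvPrio kv.1 = p)).map pvPart

lemma foldl_bucketStep (xs : List (String × String)) (a b c : List String) :
    xs.foldl pvBucketStep (a, b, c) =
      (a ++ pvBucketOf 3 xs, b ++ pvBucketOf 2 xs, c ++ pvBucketOf 1 xs) := by
  induction xs generalizing a b c with
  | nil => simp [pvBucketOf]
  | cons x t ih =>
    rw [List.foldl_cons]
    by_cases hv : x.2 = ""
    · simp only [pvBucketStep, hv, ih]
      simp [pvBucketOf, hv]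
    · rcases pvPrio_cases x.1 with h | h | h <;>
        · simp only [pvBucketStep, hv, h, ih]
          simp [pvBucketOf, hv, h, pvPart]

-- a bucket over the full list is the map of the double filter A produces
lemma bucket_char (p : Int) (memory : List (String × String)) :
    pvBucketOf p memory =
      ((memory.filter (fun kv => kv.2 ≠ "")).filter (fun kv => pvPrio kv.1 = p)).map
        (fun kv => kv.1 ++ ": " ++ kv.2) := by
  unfold pvBucketOf
  rw [List.filter_filter]
  congr 1
  apply List.filter_congr
  intro a _
  by_cases h1 : a.2 = "" <;> by_cases h2 : pvPrio a.1 = p <;> simp [h1, h2]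

-- ===== VERDICT (by name: the statement is the Claim_ definition above) =====
theorem format_priority_memory_spec : Claim_equal_format_priority_memory := by
  intro memory _
  unfold Spec_format_priority_memory format_priority_memory format_priority_memory_alt
  rw [sorted_rev_eq_buckets, foldl_bucketStep,
    bucket_char 3 memory, bucket_char 2 memory, bucket_char 1 memory]
  simp
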